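-- pv_equiv track=rewrite | github.com/HARSHIT-TOMAR-2001/Python_task | calculation.py | CalculateSeatDistribution
-- ===== SOURCE A (Python) =====
-- def CalculateSeatDistribution (input2DArray):
--     sizeOf2DArray=len(input2DArray)
--     TotalWindowSeats=0
--     TotalAisleSeats=0
--     TotalMiddleSeats=0
--     for index, l in enumerate(input2DArray):
--             if index==0:
--                 TotalWindowSeats+=l[0]
--                 # Check if only single block of seats is there(sizeOf2Darray==1). If 'yes' then Aisle seats are zero else count the aisle seats.
--                 if index!=sizeOf2DArray-1:
--                     TotalAisleSeats+=l[0]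
--
--             if index==sizeOf2DArray-1:
--                 TotalWindowSeats+=l[0]
--                 # Check if only single block of seats is there(sizeOf2Darray==1). If 'yes' then Aisle seats are zero else count the aisle seats.
--                 if index!=0:
--                     TotalAisleSeats+=l[0]
--
--             if index!=0 and index!=sizeOf2DArray-1:
--                 TotalAisleSeats+=l[0]*2
--
--             TotalMiddleSeats+=(l[0]*(l[1]-2))
--
--     return (TotalAisleSeats,TotalWindowSeats,TotalMiddleSeats)
-- ===== SOURCE B (Python) =====
-- def CalculateSeatDistribution(input2DArray):
--     # Recursive view: aisle seats arise only at the boundary between two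
--     # adjacent blocks (one edge column from each side); windows are the two
--     # outermost edge columns.  go returns (aisle, last block's edge count,
--     # middle seats) for the nonempty list head::rest.
--     if not input2DArray:
--         return (0, 0, 0)
--
--     def go(head, rest):
--         if not rest:
--             return (0, head[0], head[0] * (head[1] - 2))
--         a, last, m = go(rest[0], rest[1:])
--         return (a + head[0] + rest[0][0], last, m + head[0] * (head[1] - 2))
--
--     a, last, m = go(input2DArray[0], input2DArray[1:])
--     return (a, input2DArray[0][0] + last, m)
-- ===== Notes on version B (the rewrite author's own statement) =====
-- stated objective: alternative
-- what changed: Replaces A's per-index branching loop by a structural recursion that counts aisle seats per adjacent boundary between blocks (each boundary contributes both neighbours' edge columns) and windows as the two outermost edge columns.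
import Mathlib
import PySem

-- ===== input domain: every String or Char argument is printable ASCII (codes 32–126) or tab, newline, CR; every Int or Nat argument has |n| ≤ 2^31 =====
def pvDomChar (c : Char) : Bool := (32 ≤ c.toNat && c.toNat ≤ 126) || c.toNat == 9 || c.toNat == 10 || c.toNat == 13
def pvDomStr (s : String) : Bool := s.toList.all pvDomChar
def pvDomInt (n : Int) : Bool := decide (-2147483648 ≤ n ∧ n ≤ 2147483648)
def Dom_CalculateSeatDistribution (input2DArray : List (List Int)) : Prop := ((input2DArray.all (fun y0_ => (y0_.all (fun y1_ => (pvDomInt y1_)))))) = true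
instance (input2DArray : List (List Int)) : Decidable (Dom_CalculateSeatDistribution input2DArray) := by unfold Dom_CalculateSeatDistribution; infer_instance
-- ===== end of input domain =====

-- B replaces A's per-index branching loop by a structural recursion counting aisle
-- seats per adjacent boundary between blocks; windows are the two outermost columns.

-- ===== PORT A =====
-- step of A's `for index, l in enumerate(input2DArray)` loop; state = (aisle, window, middle)
def pvStepA (n : Int) (st : Int × Int × Int) (p : Int × List Int) : Int × Int × Int :=
  let (a, w, m) := st
  let (i, l) := p
  let l0 : Int := (PySem.List.pyGet? l 0).getD 0   -- l[0]; Pre_ rules out the IndexError case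
  let l1 : Int := (PySem.List.pyGet? l 1).getD 0   -- l[1]
  let w := if i = 0 then w + l0 else w
  let a := if i = 0 ∧ i ≠ n - 1 then a + l0 else a
  let w := if i = n - 1 then w + l0 else w
  let a := if i = n - 1 ∧ i ≠ 0 then a + l0 else a
  let a := if i ≠ 0 ∧ i ≠ n - 1 then a + 2 * l0 else a
  (a, w, m + l0 * (l1 - 2))

def CalculateSeatDistribution (input2DArray : List (List Int)) : Int × Int × Int :=
  let sizeOf2DArray : Int := input2DArray.length
  (PySem.List.enumerate input2DArray).foldl (pvStepA sizeOf2DArray) (0, 0, 0)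

-- ===== PORT B =====
def pvFst (l : List Int) : Int := (PySem.List.pyGet? l 0).getD 0      -- l[0]
def pvSnd (l : List Int) : Int := (PySem.List.pyGet? l 1).getD 0      -- l[1]

-- the inner `go(head, rest)` of Source B: (aisle, last block's edge count, middle)
def pvGo (head : List Int) (rest : List (List Int)) : Int × Int × Int :=
  match rest with
  | [] => (0, pvFst head, pvFst head * (pvSnd head - 2))
  | r :: rs =>
    let (a, last, m) := pvGo r rs
    (a + pvFst head + pvFst r, last, m + pvFst head * (pvSnd head - 2))

def CalculateSeatDistribution_alt (input2DArray : List (List Int)) : Int × Int × Int :=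
  match input2DArray with
  | [] => (0, 0, 0)
  | x :: rest =>
    let (a, last, m) := pvGo x rest
    (a, pvFst x + last, m)

-- ===== PRECONDITION & SPEC =====
-- Pre_ excludes exactly the inputs on which A raises IndexError: a row shorter than 2 (l[0]/l[1]).
def Pre_CalculateSeatDistribution (input2DArray : List (List Int)) : Prop :=
  ∀ l ∈ input2DArray, 2 ≤ l.length
instance (input2DArray : List (List Int)) : Decidable (Pre_CalculateSeatDistribution input2DArray) := by
  unfold Pre_CalculateSeatDistribution; infer_instance
def pvWitness_CalculateSeatDistribution : List (List Int) := [[2, 3], [1, 4]]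

def Spec_CalculateSeatDistribution (input2DArray : List (List Int)) (out : Int × Int × Int) : Prop := out = CalculateSeatDistribution_alt input2DArray
instance (input2DArray : List (List Int)) (out : Int × Int × Int) : Decidable (Spec_CalculateSeatDistribution input2DArray out) := by unfold Spec_CalculateSeatDistribution; infer_instance

-- ===== CLAIM (what is proved, stated in full; the proofs are below) =====
def Claim_equal_CalculateSeatDistribution : Prop := ∀ (input2DArray : List (List Int)), Dom_CalculateSeatDistribution input2DArray → Pre_CalculateSeatDistribution input2DArray → Spec_CalculateSeatDistribution input2DArray (CalculateSeatDistribution input2DArray)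

-- ===== LEMMAS AND PROOFS =====

-- closed form of B's recursion
lemma pvGo_eq (head : List Int) (rest : List (List Int)) :
    pvGo head rest =
      (((head :: rest).map (fun l => 2 * pvFst l)).sum - pvFst head
          - pvFst ((head :: rest).getLast (by simp)),
       pvFst ((head :: rest).getLast (by simp)),
       ((head :: rest).map (fun l => pvFst l * (pvSnd l - 2))).sum) := by
  induction rest generalizing head with
  | nil => simp [pvGo, List.getLast]; ring
  | cons r rs ih =>
    have hlast : (head :: r :: rs).getLast (by simp) = (r :: rs).getLast (by simp) := by
      simp [List.getLast]
    simp only [pvGo, ih r, hlast, List.map_cons, List.sum_cons, Prod.mk.injEq]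
    and_intros <;> first | rfl | trivial | ring1

-- Tail of A's loop (indices k ≥ 1 … n-1): closed form of the fold over the remaining rows.
lemma pvTailA (n : Int) (ys : List (List Int)) (k : Int) (a w m : Int)
    (hk : 1 ≤ k) (hn : k + ys.length = n) (hne : ys ≠ []) :
    (PySem.List.enumerate ys k).foldl (pvStepA n) (a, w, m)
      = (a + (ys.map (fun l => 2 * pvFst l)).sum - pvFst (ys.getLast hne),
         w + pvFst (ys.getLast hne),
         m + (ys.map (fun l => pvFst l * (pvSnd l - 2))).sum) := by
  induction ys generalizing k a w m with
  | nil => exact absurd rfl hne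
  | cons y ys ih =>
    rw [PySem.List.enumerate_cons]
    cases ys with
    | nil =>
      simp only [List.length_cons, List.length_nil] at hn
      have h0 : ¬ (k = 0) := by omega
      have hk' : k = n - 1 := by omega
      simp only [PySem.List.enumerate_nil, List.foldl_cons, List.foldl_nil, pvStepA,
        pvFst, pvSnd, List.getLast, List.map_cons, List.map_nil, List.sum_cons,
        List.sum_nil, Prod.mk.injEq]
      and_intros <;> (try split_ifs) <;> first | rfl | trivial | ring1 | tauto | (exfalso; omega)
    | cons z zs =>
      have hne2 : (z :: zs : List (List Int)) ≠ [] := by simp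
      have hlast : (y :: z :: zs).getLast hne = (z :: zs).getLast hne2 := by
        simp [List.getLast]
      simp only [List.length_cons] at hn
      push_cast at hn
      have h0 : k ≠ 0 := by omega
      have h1 : k ≠ n - 1 := by omega
      have hn' : k + 1 + ((z :: zs : List (List Int)).length : Int) = n := by
        simp only [List.length_cons]; push_cast; omega
      rw [List.foldl_cons]
      have hstep : pvStepA n (a, w, m) (k, y)
          = (a + 2 * pvFst y, w, m + pvFst y * (pvSnd y - 2)) := by
        simp only [pvStepA, pvFst, pvSnd, Prod.mk.injEq]
        and_intros <;> (try split_ifs) <;> first | rfl | trivial | ring1 | tauto | (exfalso; omega)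
      rw [hstep, ih (k + 1) _ _ _ (by omega) hn' hne2, hlast]
      simp only [List.map_cons, List.sum_cons, Prod.mk.injEq]
      and_intros <;> (try split_ifs) <;> first | rfl | trivial | ring1 | tauto | (exfalso; omega)

-- ===== VERDICT (by name: the statement is the Claim_ definition above) =====
theorem CalculateSeatDistribution_spec : Claim_equal_CalculateSeatDistribution := by
  intro xs _ _
  unfold Spec_CalculateSeatDistribution CalculateSeatDistribution CalculateSeatDistribution_alt
  cases xs with
  | nil => simp [PySem.List.enumerate]
  | cons x rest =>
    rw [PySem.List.enumerate_cons]
    cases rest with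
    | nil =>
      simp [pvStepA, pvGo, pvFst, pvSnd, PySem.List.enumerate]
      try ring
    | cons z zs =>
      have hne2 : (z :: zs : List (List Int)) ≠ [] := by simp
      have hA : pvStepA ((x :: z :: zs : List (List Int)).length : Int) (0, 0, 0) (0, x)
          = (pvFst x, pvFst x, pvFst x * (pvSnd x - 2)) := by
        simp only [pvStepA, pvFst, pvSnd, Prod.mk.injEq, List.length_cons]
        push_cast
        simp only [true_and, false_and, and_false, and_true, if_false, if_true, ite_false, ite_true]
        and_intros <;> (try split_ifs) <;> first | rfl | trivial | ring1 | tauto | (exfalso; omega)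
      have hlen : (1 : Int) + ((z :: zs : List (List Int)).length : Int)
          = ((x :: z :: zs : List (List Int)).length : Int) := by
        simp only [List.length_cons]; push_cast; omega
      have hlast : (x :: z :: zs).getLast (by simp) = (z :: zs).getLast hne2 := by
        simp [List.getLast]
      rw [List.foldl_cons, hA, zero_add, pvTailA _ _ 1 _ _ _ (by omega) hlen hne2]
      simp only [pvGo_eq, hlast, List.map_cons, List.sum_cons, Prod.mk.injEq]
      and_intros <;> first | rfl | trivial | ring1
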